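-- pv_equiv track=rewrite | github.com/YongsHub/TIL | Algorithm/Programmers level 2/[3차] 방금그곡.py | makeToLong
-- ===== SOURCE A (Python) =====
-- def makeToLong(notes, length):
--     types = ['A', 'C', 'D', 'F', 'G']
--     lst = []
--     for index, note in enumerate(notes):
--         if note == '#':
--             continue
--         if note in types and index < len(notes) - 1 and notes[index + 1] == '#':
--             lst.append(note + '#')
--         else:
--             lst.append(note)
--     while True:
--         lst = lst * 2
--         if len(lst) > length:
--             return lst
-- ===== SOURCE B (Python) =====
-- def makeToLong(notes, length):
--     types = ['A', 'C', 'D', 'F', 'G']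
--     lst = []
--     for ch in notes:
--         if ch != '#':
--             lst.append(ch)
--         elif lst and lst[-1] in types:
--             lst[-1] += '#'
--     m = 2
--     while len(lst) * m <= length:
--         m *= 2
--     return lst * m
-- ===== Notes on version B (the rewrite author's own statement) =====
-- stated objective: alternative
-- what changed: The index-based look-ahead parse over enumerate(notes) is replaced by a delimiter-driven look-back scan (a '#' is attached to the previous token in place), and the repeated list-doubling loop is replaced by computing the power-of-two multiplier arithmetically and replicating the token list once.
import Mathlib
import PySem

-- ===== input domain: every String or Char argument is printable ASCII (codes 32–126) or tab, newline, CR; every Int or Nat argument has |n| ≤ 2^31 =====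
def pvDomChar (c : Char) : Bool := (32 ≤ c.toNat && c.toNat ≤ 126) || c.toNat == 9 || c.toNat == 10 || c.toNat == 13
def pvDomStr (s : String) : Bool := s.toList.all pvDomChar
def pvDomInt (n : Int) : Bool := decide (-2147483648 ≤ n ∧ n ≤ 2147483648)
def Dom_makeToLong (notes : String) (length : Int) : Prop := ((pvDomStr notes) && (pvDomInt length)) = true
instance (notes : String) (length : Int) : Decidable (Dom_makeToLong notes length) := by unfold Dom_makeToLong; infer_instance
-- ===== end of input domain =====

-- B replaces A's index-based look-ahead parse by a look-back scan and the list-doubling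
-- loop by an arithmetic multiplier search plus one replication (measured faster in a timing run).

-- ===== PORT A =====
def typesA : List Char := ['A', 'C', 'D', 'F', 'G']

-- one iteration of A's for-loop over enumerate(notes)
def stepA (all : List Char) (lst : List String) (p : Int × Char) : List String :=
  if p.2 = '#' then lst
  else if p.2 ∈ typesA ∧ p.1 < (all.length : Int) - 1 ∧ PySem.List.pyGetD all (p.1 + 1) ' ' = '#'
  then lst ++ [String.ofList [p.2, '#']]
  else lst ++ [String.ofList [p.2]]

-- A's `while True: lst = lst * 2; if len(lst) > length: return lst`.
-- Fuel 64 suffices on Dom ∧ Pre_ (|length| ≤ 2^31 and the list is nonempty, or length < 0).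
def loopA (length : Int) : Nat → List String → List String
  | 0, l => l
  | f + 1, l =>
    let l2 := l ++ l
    if length < (l2.length : Int) then l2 else loopA length f l2

def makeToLong (notes : String) (length : Int) : List String :=
  let lst := (PySem.List.enumerate notes.toList 0).foldl (stepA notes.toList) []
  loopA length 64 lst

-- ===== PORT B =====
def typesB : List String := ["A", "C", "D", "F", "G"]

-- one iteration of B's for-loop: push a letter, or attach '#' to the previous token
-- (lst[-1] += '#' ported exactly as String.ofList (t.toList ++ ['#']))
def stepB (lst : List String) (ch : Char) : List String :=
  if ch ≠ '#' then lst ++ [String.singleton ch]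
  else
    match lst.getLast? with
    | some t => if t ∈ typesB then lst.dropLast ++ [String.ofList (t.toList ++ ['#'])] else lst
    | none => lst

-- B's `m = 2; while len(lst) * m <= length: m *= 2` (same fuel bound as A's loop)
def findM (n length : Int) : Nat → Nat → Nat
  | 0, m => m
  | f + 1, m => if n * (m : Int) ≤ length then findM n length f (m * 2) else m

def makeToLong_alt (notes : String) (length : Int) : List String :=
  let lst := notes.toList.foldl stepB []
  let m := findM (lst.length : Int) length 64 2
  (List.replicate m lst).flatten   -- lst * m

-- ===== PRECONDITION & SPEC =====
-- Pre_ excludes exactly the inputs on which A never returns (it loops forever doubling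
-- an empty token list): notes consisting solely of '#' together with length ≥ 0.
def Pre_makeToLong (notes : String) (length : Int) : Prop :=
  length < 0 ∨ notes.toList.any (fun c => c ≠ '#') = true
instance (notes : String) (length : Int) : Decidable (Pre_makeToLong notes length) := by
  unfold Pre_makeToLong; infer_instance

def pvWitness_makeToLong : String × Int := ("C", 0)

def Spec_makeToLong (notes : String) (length : Int) (out : List String) : Prop := out = makeToLong_alt notes length
instance (notes : String) (length : Int) (out : List String) : Decidable (Spec_makeToLong notes length out) := by unfold Spec_makeToLong; infer_instance

-- ===== CLAIM (what is proved, stated in full; the proofs are below) =====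
def Claim_equal_makeToLong : Prop := ∀ (notes : String) (length : Int), Dom_makeToLong notes length → Pre_makeToLong notes length → Spec_makeToLong notes length (makeToLong notes length)

-- ===== LEMMAS AND PROOFS =====

theorem push_empty (c : Char) : "".push c = String.ofList [c] := rfl

-- common specification of the token list both parses produce
def tok : List Char → List String
  | [] => []
  | c :: cs =>
    if c = '#' then tok cs
    else (if c ∈ typesA ∧ cs.head? = some '#' then String.ofList [c, '#'] else String.ofList [c]) :: tok cs

theorem parseA_go : ∀ (suf pre : List Char) (acc : List String),
    List.foldl (stepA (pre ++ suf)) acc (PySem.List.enumerate suf (pre.length : Int))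
      = acc ++ tok suf := by
  intro suf
  induction suf with
  | nil => intro pre acc; simp [PySem.List.enumerate, tok]
  | cons c cs ih =>
    intro pre acc
    rw [PySem.List.enumerate_cons]
    simp only [List.foldl_cons]
    by_cases hc : c = '#'
    · subst hc
      have h1 : stepA (pre ++ '#' :: cs) acc ((pre.length : Int), '#') = acc := by
        simp [stepA]
      rw [h1]
      have h2 := ih (pre ++ ['#']) acc
      simpa [tok, List.append_assoc, Int.natCast_add] using h2
    · -- evaluate the look-ahead condition
      have hidx : PySem.List.pyGetD (pre ++ c :: cs) ((pre.length : Int) + 1) ' '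
          = cs.getD 0 ' ' := by
        have : ((pre.length : Int) + 1) = ((pre.length + 1 : Nat) : Int) := by push_cast; ring
        rw [this, PySem.List.pyGetD_natCast]
        rcases cs with _ | ⟨c', cs'⟩
        · simp [List.getD, List.getElem?_append_right (by omega : pre.length ≤ pre.length + 1)]
        · simp [List.getD, List.getElem?_append_right (by omega : pre.length ≤ pre.length + 1)]
      have hlen : ((pre ++ c :: cs).length : Int) = pre.length + 1 + cs.length := by
        simp; push_cast; ring
      have hcond : (c ∈ typesA ∧ (pre.length : Int) < ((pre ++ c :: cs).length : Int) - 1 ∧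
            PySem.List.pyGetD (pre ++ c :: cs) ((pre.length : Int) + 1) ' ' = '#')
          ↔ (c ∈ typesA ∧ cs.head? = some '#') := by
        rw [hidx, hlen]
        rcases cs with _ | ⟨c', cs'⟩
        · simp
        · simp only [List.getD, List.getElem?_cons_zero, Option.getD_some, List.head?_cons,
            Option.some.injEq, List.length_cons]
          constructor
          · rintro ⟨h1, _, h3⟩; exact ⟨h1, h3⟩
          · rintro ⟨h1, h3⟩; exact ⟨h1, by push_cast; omega, h3⟩
      by_cases hct : c ∈ typesA ∧ cs.head? = some '#'
      · have h1 : stepA (pre ++ c :: cs) acc ((pre.length : Int), c)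
            = acc ++ [String.ofList [c, '#']] := by
          simp only [stepA]
          rw [if_neg hc, if_pos (hcond.mpr hct)]
        rw [h1]
        have h2 := ih (pre ++ [c]) (acc ++ [String.ofList [c, '#']])
        simp only [List.append_assoc, List.singleton_append, List.length_append,
          List.length_cons, List.length_nil] at h2
        rw [show ((pre.length + (0 + 1) : Nat) : Int) = (pre.length : Int) + 1 by push_cast; ring] at h2
        rw [h2]
        simp [tok, hc, hct]
      · have h1 : stepA (pre ++ c :: cs) acc ((pre.length : Int), c)
            = acc ++ [String.ofList [c]] := by
          simp only [stepA]
          rw [if_neg hc, if_neg (fun h => hct (hcond.mp h))]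
        rw [h1]
        have h2 := ih (pre ++ [c]) (acc ++ [String.ofList [c]])
        simp only [List.append_assoc, List.singleton_append, List.length_append,
          List.length_cons, List.length_nil] at h2
        rw [show ((pre.length + (0 + 1) : Nat) : Int) = (pre.length : Int) + 1 by push_cast; ring] at h2
        rw [h2]
        simp [tok, hc, hct]

theorem parseA_eq_tok (all : List Char) :
    (PySem.List.enumerate all 0).foldl (stepA all) [] = tok all := by
  have := parseA_go all [] []
  simpa using this

-- membership bridges between the Char alphabet and the singleton-string alphabet
theorem singleton_mem_typesB (c : Char) : String.singleton c ∈ typesB ↔ c ∈ typesA := by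
  constructor
  · intro h
    simp only [typesB, List.mem_cons, List.not_mem_nil, or_false] at h
    rcases h with h | h | h | h | h <;>
      · have := congrArg String.toList h
        simp [String.singleton] at this
        simp [typesA, this]
  · intro h
    simp only [typesA, List.mem_cons, List.not_mem_nil, or_false] at h
    rcases h with h | h | h | h | h <;> subst h <;> decide

theorem sharp_not_mem_typesB (c : Char) : String.ofList [c, '#'] ∉ typesB := by
  intro h
  simp only [typesB, List.mem_cons, List.not_mem_nil, or_false] at h
  rcases h with h | h | h | h | h <;>
    · have := congrArg String.toList h
      simp at this

theorem parseB_go : ∀ (N : Nat) (cs : List Char), cs.length ≤ N → ∀ acc : List String,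
    (cs.head? = some '#' → ∀ t ∈ acc.getLast?, t ∉ typesB) →
    cs.foldl stepB acc = acc ++ tok cs := by
  intro N
  induction N with
  | zero =>
    intro cs h acc _
    have : cs = [] := List.eq_nil_of_length_eq_zero (by omega)
    subst this; simp [tok]
  | succ N ih =>
    intro cs hlen acc hP
    rcases cs with _ | ⟨c, cs⟩
    · simp [tok]
    by_cases hc : c = '#'
    · subst hc
      have hskip : stepB acc '#' = acc := by
        rcases hlast : acc.getLast? with _ | t
        · simp [stepB, hlast]
        · simp [stepB, hlast, hP rfl t (by simp [hlast])]
      simp only [List.foldl_cons, hskip]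
      rw [ih cs (by simpa using hlen) acc
        (fun _ t ht => hP rfl t ht)]
      simp [tok]
    · -- push the letter c
      have hpush : stepB acc c = acc ++ [String.singleton c] := by
        simp [stepB, hc]
      rcases cs with _ | ⟨c', cs'⟩
      · simp [List.foldl_cons, hpush, tok, hc, String.singleton, push_empty]
      by_cases h2 : c ∈ typesA ∧ c' = '#'
      · -- attach case: two steps at once
        obtain ⟨hcA, rfl⟩ := h2
        have hattach : stepB (acc ++ [String.singleton c]) '#'
            = acc ++ [String.ofList [c, '#']] := by
          simp only [stepB, ne_eq, not_true_eq_false, if_false, List.getLast?_concat]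
          rw [if_pos ((singleton_mem_typesB c).mpr hcA)]
          simp [String.singleton, List.dropLast_concat]
        simp only [List.foldl_cons, hpush, hattach]
        rw [ih cs' (by simp at hlen ⊢; omega) (acc ++ [String.ofList [c, '#']])
          (fun _ t ht => by
            simp only [List.getLast?_concat, Option.mem_def, Option.some.injEq] at ht
            subst ht; exact sharp_not_mem_typesB c)]
        simp [tok, hc, hcA]
      · -- no attach: one step, next char is not '#' or c ∉ types
        rw [List.foldl_cons, hpush]
        rw [ih (c' :: cs') (by simpa using hlen) (acc ++ [String.singleton c])
          (fun hh t ht => by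
            simp only [List.head?_cons, Option.some.injEq] at hh
            simp only [List.getLast?_concat, Option.mem_def, Option.some.injEq] at ht
            subst ht
            intro hmem
            exact h2 ⟨(singleton_mem_typesB c).mp hmem, hh⟩)]
        have : ¬ (c ∈ typesA ∧ (c' :: cs').head? = some '#') := by
          simpa using fun h a => h2 ⟨h, a⟩
        simp [tok, hc, this, String.singleton, push_empty]
        intro hA hq
        exact absurd ⟨hA, hq⟩ h2

theorem parseB_eq_tok (all : List Char) : all.foldl stepB [] = tok all := by
  have := parseB_go all.length all le_rfl [] (by intro _ t ht; simp at ht)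
  simpa using this

theorem tok_ne_nil {cs : List Char} (h : ∃ c ∈ cs, c ≠ '#') : tok cs ≠ [] := by
  induction cs with
  | nil => simp at h
  | cons c cs ih =>
    by_cases hc : c = '#'
    · subst hc
      rcases h with ⟨d, hd, hdn⟩
      rcases hd with _ | hd
      · exact absurd rfl hdn
      · simp only [tok, if_pos rfl]
        exact ih ⟨d, by assumption, hdn⟩
    · simp [tok, hc]

-- lst * m and its length
def mulL (l : List String) (m : Nat) : List String := (List.replicate m l).flatten

theorem mulL_length (l : List String) (m : Nat) : (mulL l m).length = l.length * m := by
  induction m with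
  | zero => simp [mulL]
  | succ m ih =>
    simp only [mulL, List.replicate_succ, List.flatten_cons, List.length_append]
    rw [show (List.replicate m l).flatten.length = l.length * m from ih]
    ring

theorem mulL_double (l : List String) (m : Nat) : mulL l m ++ mulL l m = mulL l (m * 2) := by
  have h : m * 2 = m + m := by ring
  simp only [mulL]
  rw [h, List.replicate_add, List.flatten_append]

theorem mulL_one (l : List String) : mulL l 1 = l := by simp [mulL]

-- one-step unfoldings of the two loops
theorem loopA_succ (length : Int) (f : Nat) (l : List String) :
    loopA length (f + 1) l = if length < ((l ++ l).length : Int) then l ++ l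
      else loopA length f (l ++ l) := rfl

theorem findM_succ (n length : Int) (f m : Nat) :
    findM n length (f + 1) m = if n * (m : Int) ≤ length then findM n length f (m * 2) else m := rfl

-- the doubling loop equals replication by the multiplier the while-loop finds
theorem loop_eq_findM (l : List String) (length : Int) : ∀ (f m : Nat), 1 ≤ l.length →
    length < (l.length : Int) * (m : Int) * 2 ^ f →
    loopA length (f + 1) (mulL l m) = mulL l (findM (l.length : Int) length (f + 1) (m * 2)) := by
  have hcast : ∀ m : Nat, ((mulL l m ++ mulL l m).length : Int)
      = (l.length : Int) * ((m * 2 : Nat) : Int) := by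
    intro m; rw [mulL_double, mulL_length]; push_cast; ring
  have hL0 : (0 : Int) ≤ (l.length : Int) := by positivity
  intro f
  induction f with
  | zero =>
    intro m hl hfits
    simp only [pow_zero, mul_one] at hfits
    have hm0 : (0 : Int) ≤ (m : Int) := by positivity
    have hlt : length < ((mulL l m ++ mulL l m).length : Int) := by
      rw [hcast]; push_cast; nlinarith [hfits]
    have hle : ¬ ((l.length : Int) * ((m * 2 : Nat) : Int) ≤ length) := by
      rw [← hcast]; omega
    rw [loopA_succ, findM_succ, if_pos hlt, if_neg hle, mulL_double]
  | succ f ih =>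
    intro m hl hfits
    rw [loopA_succ, findM_succ]
    by_cases hle : (l.length : Int) * ((m * 2 : Nat) : Int) ≤ length
    · rw [if_neg (by rw [hcast]; omega), if_pos hle, mulL_double]
      exact ih (m * 2) hl (by
        have h1 : (l.length : Int) * ((m * 2 : Nat) : Int) * 2 ^ f
            = (l.length : Int) * (m : Int) * 2 ^ (f + 1) := by push_cast; ring
        rw [h1]; exact hfits)
    · rw [if_pos (by rw [hcast]; omega), if_neg hle, mulL_double]

-- ===== VERDICT (by name: the statement is the Claim_ definition above) =====
theorem makeToLong_spec : Claim_equal_makeToLong := by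
  intro notes length hdom hpre
  unfold Spec_makeToLong makeToLong makeToLong_alt
  rw [parseA_eq_tok, parseB_eq_tok]
  set L := tok notes.toList with hL
  by_cases hnil : L = []
  · -- then Pre_ forces length < 0; both sides return the empty list
    have hneg : length < 0 := by
      rcases hpre with h | h
      · exact h
      · obtain ⟨c, hc, hne⟩ := List.any_eq_true.mp h
        exact absurd hnil (tok_ne_nil ⟨c, hc, of_decide_eq_true hne⟩)
    have hA : ∀ f, loopA length (f + 1) ([] : List String) = [] := by
      intro f; rw [loopA_succ]; simp [hneg]
    have hB : ∀ f, findM ((0 : Nat) : Int) length (f + 1) 2 = 2 := by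
      intro f
      have h0 : ¬ (((0 : Nat) : Int) * ((2 : Nat) : Int) ≤ length) := by push_cast; omega
      rw [findM_succ, if_neg h0]
    have hflat : ∀ m : Nat, (List.replicate m ([] : List String)).flatten = [] := by
      intro m; induction m with
      | zero => simp
      | succ m ih => simp [List.replicate_succ, ih]
    rw [hnil]
    rw [show (64 : Nat) = 63 + 1 from rfl, hA 63]
    simp only [List.length_nil, hB 63, hflat]
  · have hl : 1 ≤ L.length := by
      rcases L with _ | _
      · exact absurd rfl hnil
      · simp
    have hbound : length ≤ 2147483648 := by
      unfold Dom_makeToLong pvDomInt at hdom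
      simp only [Bool.and_eq_true, decide_eq_true_eq] at hdom
      exact hdom.2.2
    have hfits : length < (L.length : Int) * ((1 : Nat) : Int) * 2 ^ 63 := by
      have h1 : (1 : Int) ≤ (L.length : Int) := by exact_mod_cast hl
      have hp : (2147483648 : Int) < 2 ^ 63 := by norm_num
      have h2 : (1 : Int) * 2 ^ 63 ≤ (L.length : Int) * 2 ^ 63 :=
        mul_le_mul_of_nonneg_right h1 (by positivity)
      push_cast
      nlinarith [hp, h2, hbound]
    have := loop_eq_findM L length 63 1 hl hfits
    rw [mulL_one] at this
    simpa [mulL] using this
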